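-- pv_equiv track=rewrite | github.com/niewiemczego/gmail-alias-generator | gmail_alias_generator/helpers.py | _generate_combinations_for
-- ===== SOURCE A (Python) =====
-- from itertools import combinations
--
-- def _generate_combinations_for(email: str, max_dots: int, current_dots: int) -> list[str]:
--     combinations_indexes = combinations(range(1, max_dots + 1), current_dots)
--     # i.e.: for word 'tymek' its (4 after current_dots) cuz we got 4 places where we can put the dot
--     aliases = []
--     for combination_indexes in combinations_indexes:
--         new_alias = ""
--         for i, char in enumerate(email):
--             if i in combination_indexes:
--                 new_alias += "."
--             new_alias += char
--
--         aliases.append(new_alias)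
--
--     return aliases
-- ===== SOURCE B (Python) =====
-- from itertools import combinations
--
-- def _generate_combinations_for(email: str, max_dots: int, current_dots: int) -> list[str]:
--     n = len(email)
--
--     def alias(combo):
--         cuts = [p for p in combo if p < n]
--         segments = []
--         prev = 0
--         for p in cuts:
--             segments.append(email[prev:p])
--             prev = p
--         segments.append(email[prev:])
--         return ".".join(segments)
--
--     return [alias(c) for c in combinations(range(1, max_dots + 1), current_dots)]
-- ===== Notes on version B (the rewrite author's own statement) =====
-- stated objective: idiomatic
-- what changed: Instead of walking the email character by character and testing each index for membership in the combination tuple, B slices the email at the combination's cut positions (those below len(email)) and joins the pieces with '.'.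
import Mathlib
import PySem

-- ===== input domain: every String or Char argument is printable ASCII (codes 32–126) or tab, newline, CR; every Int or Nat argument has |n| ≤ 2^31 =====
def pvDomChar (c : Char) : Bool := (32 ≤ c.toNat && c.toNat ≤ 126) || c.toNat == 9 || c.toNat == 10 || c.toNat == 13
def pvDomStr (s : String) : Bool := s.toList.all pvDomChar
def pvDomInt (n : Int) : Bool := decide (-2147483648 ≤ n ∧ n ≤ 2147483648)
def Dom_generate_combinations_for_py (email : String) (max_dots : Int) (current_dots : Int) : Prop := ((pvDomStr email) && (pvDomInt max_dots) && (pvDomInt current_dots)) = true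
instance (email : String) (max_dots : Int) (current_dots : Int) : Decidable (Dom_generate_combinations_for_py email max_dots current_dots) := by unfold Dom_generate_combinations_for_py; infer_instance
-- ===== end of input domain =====

-- B builds each alias by slicing the email at the combination's cut positions and joining with '.',
-- instead of A's per-character walk with a membership test (objective: idiomatic).

-- Shared port of the library call itertools.combinations (both Pythons call it),
-- in itertools' lexicographic emission order.
def pyCombinations : List Int → Nat → List (List Int)
  | _, 0 => [[]]
  | [], _ + 1 => []
  | x :: xs, r + 1 =>
    -- itertools' early return when r exceeds the pool size (otherwise the result is empty anyway)
    if xs.length + 1 < r + 1 then []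
    else (pyCombinations xs r).map (x :: ·) ++ pyCombinations xs (r + 1)

-- ===== PORT A =====
def generate_combinations_for_py (email : String) (max_dots : Int) (current_dots : Int) : List String :=
  let combinations_indexes := pyCombinations (PySem.List.pyRange 1 (max_dots + 1) 1) current_dots.toNat
  combinations_indexes.foldl (fun aliases c =>
    aliases ++ [String.ofList ((PySem.List.enumerate email.toList 0).foldl
      (fun new_alias p => (if c.contains p.1 then new_alias ++ ['.'] else new_alias) ++ [p.2])
      ([] : List Char))]) []

-- ===== PORT B =====
def pvAlias (l : List Char) (combo : List Int) : String :=
  let cuts := combo.filter (fun p => p < (l.length : Int))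
  let st := cuts.foldl (fun (acc : List (List Char) × Int) p =>
      (acc.1 ++ [PySem.List.slice l (some acc.2) (some p)], p)) (([], 0) : List (List Char) × Int)
  String.ofList (PySem.Chars.join ['.'] (st.1 ++ [PySem.List.slice l (some st.2) none]))

def generate_combinations_for_py_alt (email : String) (max_dots : Int) (current_dots : Int) : List String :=
  (pyCombinations (PySem.List.pyRange 1 (max_dots + 1) 1) current_dots.toNat).map (pvAlias email.toList)

-- ===== PRECONDITION & SPEC =====
-- Pre_ excludes current_dots < 0, on which Python's combinations raises ValueError.
def Pre_generate_combinations_for_py (email : String) (max_dots : Int) (current_dots : Int) : Prop :=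
  0 ≤ current_dots
instance (email : String) (max_dots : Int) (current_dots : Int) : Decidable (Pre_generate_combinations_for_py email max_dots current_dots) := by unfold Pre_generate_combinations_for_py; infer_instance

def pvWitness_generate_combinations_for_py : String × Int × Int := ("tymek", 4, 2)

def Spec_generate_combinations_for_py (email : String) (max_dots : Int) (current_dots : Int) (out : List String) : Prop := out = generate_combinations_for_py_alt email max_dots current_dots
instance (email : String) (max_dots : Int) (current_dots : Int) (out : List String) : Decidable (Spec_generate_combinations_for_py email max_dots current_dots out) := by unfold Spec_generate_combinations_for_py; infer_instance

-- ===== CLAIM (what is proved, stated in full; the proofs are below) =====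
def Claim_equal_generate_combinations_for_py : Prop := ∀ (email : String) (max_dots : Int) (current_dots : Int), Dom_generate_combinations_for_py email max_dots current_dots → Pre_generate_combinations_for_py email max_dots current_dots → Spec_generate_combinations_for_py email max_dots current_dots (generate_combinations_for_py email max_dots current_dots)

-- ===== LEMMAS AND PROOFS =====

-- the dotted string both sides compute, as one structural recursion over the characters
def pvDot (c : List Int) : Int → List Char → List Char
  | _, [] => []
  | i, ch :: t => (if c.contains i then ['.', ch] else [ch]) ++ pvDot c (i + 1) t

-- absolute-position segments produced by B's inner loop
def pvSegs (l : List Char) : Int → List Int → List (List Char)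
  | prev, [] => [PySem.List.slice l (some prev) none]
  | prev, p :: rest => PySem.List.slice l (some prev) (some p) :: pvSegs l p rest

lemma mem_pyCombinations_sublist : ∀ (xs : List Int) (r : Nat) (c : List Int),
    c ∈ pyCombinations xs r → c.Sublist xs := by
  intro xs
  induction xs with
  | nil =>
    intro r c h
    cases r with
    | zero => simp [pyCombinations] at h; simp [h]
    | succ r => simp [pyCombinations] at h
  | cons x xs ih =>
    intro r c h
    cases r with
    | zero => simp [pyCombinations] at h; simp [h]
    | succ r =>
      simp only [pyCombinations] at h
      by_cases hlen : xs.length + 1 < r + 1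
      · rw [if_pos hlen] at h; simp at h
      · rw [if_neg hlen] at h
        simp only [List.mem_append, List.mem_map] at h
        rcases h with ⟨c', hc', rfl⟩ | h
        · exact (ih r c' hc').cons₂ x
        · exact (ih (r + 1) c h).cons x

lemma pvDot_nil (i : Int) (m : List Char) : pvDot [] i m = m := by
  induction m generalizing i with
  | nil => rfl
  | cons ch t ih => simp [pvDot, ih]

lemma foldlA_eq_dot (c : List Int) : ∀ (l : List Char) (i : Int) (s : List Char),
    (PySem.List.enumerate l i).foldl
      (fun new_alias p => (if c.contains p.1 then new_alias ++ ['.'] else new_alias) ++ [p.2]) s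
      = s ++ pvDot c i l := by
  intro l
  induction l with
  | nil => intro i s; simp [PySem.List.enumerate_nil, pvDot]
  | cons ch t ih =>
    intro i s
    rw [PySem.List.enumerate_cons, List.foldl_cons, ih]
    by_cases h : i ∈ c <;> simp [pvDot, h]

lemma pvDot_filter (c : List Int) (n : Int) : ∀ (l : List Char) (i : Int),
    i + l.length ≤ n → pvDot (c.filter (fun p => p < n)) i l = pvDot c i l := by
  intro l
  induction l with
  | nil => intro i _; rfl
  | cons ch t ih =>
    intro i hle
    have hin : i < n := by
      have := t.length
      simp only [List.length_cons] at hle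
      omega
    have hrec : pvDot (c.filter (fun p => p < n)) (i + 1) t = pvDot c (i + 1) t := by
      apply ih; simp only [List.length_cons] at hle; omega
    simp [pvDot, hrec, hin]

lemma foldlB_eq_segs (l : List Char) : ∀ (cuts : List Int) (acc : List (List Char)) (prev : Int),
    (cuts.foldl (fun (acc : List (List Char) × Int) p =>
        (acc.1 ++ [PySem.List.slice l (some acc.2) (some p)], p)) (acc, prev)).1
      ++ [PySem.List.slice l
            (some (cuts.foldl (fun (acc : List (List Char) × Int) p =>
              (acc.1 ++ [PySem.List.slice l (some acc.2) (some p)], p)) (acc, prev)).2) none]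
      = acc ++ pvSegs l prev cuts := by
  intro cuts
  induction cuts with
  | nil => intro acc prev; simp [pvSegs]
  | cons p rest ih => intro acc prev; simp [List.foldl_cons, ih, pvSegs]

lemma pvDot_split (c : List Int) : ∀ (k : Nat) (i : Int) (m : List Char),
    (∀ q ∈ c, i + k ≤ q) →
    pvDot c i m = m.take k ++ pvDot c (i + k) (m.drop k) := by
  intro k
  induction k with
  | zero => intro i m _; simp
  | succ k ih =>
    intro i m hq
    cases m with
    | nil => simp [pvDot]
    | cons ch t =>
      have hni : c.contains i = false := by
        by_contra h
        have : i ∈ c := by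
          simpa [List.elem_eq_contains.symm, List.elem_eq_mem] using
            (Bool.not_eq_false _).mp h
        have := hq i this
        omega
      have hrec := ih (i + 1) t (by intro q hmq; have := hq q hmq; omega)
      simp only [pvDot, hni, List.take_succ_cons, List.drop_succ_cons]
      rw [hrec]
      simp
      ring_nf

lemma pvDot_cons_gt (p : Int) (rest : List Int) : ∀ (m : List Char) (j : Int),
    p < j → pvDot (p :: rest) j m = pvDot rest j m := by
  intro m
  induction m with
  | nil => intro j _; rfl
  | cons ch t ih =>
    intro j hj
    have hne : j ≠ p := by omega
    simp [pvDot, ih (j + 1) (by omega), hne]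

lemma join_segs_eq_dot (l : List Char) : ∀ (cuts : List Int) (i : Nat),
    cuts.Pairwise (· < ·) →
    (∀ p ∈ cuts, (i : Int) < p ∧ p < (l.length : Int)) →
    PySem.Chars.join ['.'] (pvSegs l (i : Int) cuts) = pvDot cuts i (l.drop i) := by
  intro cuts
  induction cuts with
  | nil =>
    intro i _ _
    rw [show pvSegs l (i : Int) [] = [PySem.List.slice l (some (i : Int)) none] from rfl,
      PySem.Chars.join_singleton, PySem.List.slice_from_natCast, pvDot_nil]
  | cons p rest ih =>
    intro i hpw hb
    obtain ⟨hip, hpn⟩ := hb p (List.mem_cons_self)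
    have hp0 : 0 ≤ p := by omega
    have hpnat : ((p.toNat : Nat) : Int) = p := Int.toNat_of_nonneg hp0
    have hipn : i < p.toNat := by omega
    have hrest_gt : ∀ q ∈ rest, p < q := fun q hq => (List.pairwise_cons.mp hpw).1 q hq
    -- LHS
    have hsegs_tail : pvSegs l p rest = pvSegs l ((p.toNat : Nat) : Int) rest := by rw [hpnat]
    have hjoin_tail : PySem.Chars.join ['.'] (pvSegs l ((p.toNat : Nat) : Int) rest)
        = pvDot rest p.toNat (l.drop p.toNat) := by
      apply ih p.toNat (List.pairwise_cons.mp hpw).2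
      intro q hq
      refine ⟨by have := hrest_gt q hq; omega, (hb q (List.mem_cons_of_mem _ hq)).2⟩
    have hslice : PySem.List.slice l (some (i : Int)) (some p)
        = (l.drop i).take (p.toNat - i) := by
      rw [← hpnat, PySem.List.slice_natCast]
      simp
      omega
    have hjoin : PySem.Chars.join ['.'] (pvSegs l (i : Int) (p :: rest))
        = (l.drop i).take (p.toNat - i) ++ '.' :: pvDot rest p.toNat (l.drop p.toNat) := by
      obtain ⟨b, ss, hbs⟩ : ∃ b ss, pvSegs l p rest = b :: ss := by
        cases rest <;> exact ⟨_, _, rfl⟩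
      have hstep : pvSegs l (i : Int) (p :: rest)
          = PySem.List.slice l (some (i : Int)) (some p) :: pvSegs l p rest := rfl
      rw [hstep, hbs, PySem.Chars.join_cons_cons, ← hbs, hsegs_tail, hjoin_tail, hslice]
      simp only [List.append_assoc, List.singleton_append]
    -- RHS
    have hsplit := pvDot_split (p :: rest) (p.toNat - i) (i : Int) (l.drop i)
      (by
        intro q hq
        rcases List.mem_cons.mp hq with rfl | hq'
        · omega
        · have := hrest_gt q hq'; omega)
    have hik : ((i : Int) + ((p.toNat - i : Nat) : Int)) = ((p.toNat : Nat) : Int) := by omega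
    rw [hjoin, hsplit, hik, List.drop_drop]
    have hdp : i + (p.toNat - i) = p.toNat := by omega
    rw [hdp]
    -- it remains to show the tails agree
    congr 1
    have hlt : p.toNat < l.length := by omega
    obtain ⟨ch, t, hct⟩ : ∃ ch t, l.drop p.toNat = ch :: t := by
      have : l.drop p.toNat ≠ [] := by
        simp [List.drop_eq_nil_iff]; omega
      cases h : l.drop p.toNat with
      | nil => exact absurd h this
      | cons a b => exact ⟨a, b, rfl⟩
    rw [hct]
    have hcont : (p :: rest).contains ((p.toNat : Nat) : Int) = true := by
      simp [hpnat]
    have hcont' : rest.contains ((p.toNat : Nat) : Int) = false := by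
      simp [hpnat]
      intro h; have := hrest_gt p h; omega
    simp only [pvDot, hcont, if_true, hcont']
    rw [pvDot_cons_gt p rest t (((p.toNat : Nat) : Int) + 1) (by omega)]
    simp

lemma alias_eq (l : List Char) (c : List Int) (hpw : c.Pairwise (· < ·))
    (hpos : ∀ p ∈ c, 1 ≤ p) :
    String.ofList ((PySem.List.enumerate l 0).foldl
      (fun new_alias p => (if c.contains p.1 then new_alias ++ ['.'] else new_alias) ++ [p.2])
      ([] : List Char)) = pvAlias l c := by
  rw [foldlA_eq_dot, List.nil_append]
  unfold pvAlias
  dsimp only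
  rw [foldlB_eq_segs, List.nil_append]
  have h0 : ((0 : Int)) = ((0 : Nat) : Int) := rfl
  rw [h0, join_segs_eq_dot l (c.filter (fun p => p < (l.length : Int))) 0
    (hpw.filter _)
    (by
      intro p hp
      have := List.mem_filter.mp hp
      exact ⟨by have := hpos p this.1; omega, by simpa using this.2⟩)]
  rw [List.drop_zero]
  rw [pvDot_filter c (l.length : Int) l ((0 : Nat) : Int) (by simp)]

-- ===== VERDICT (by name: the statement is the Claim_ definition above) =====
theorem generate_combinations_for_py_spec : Claim_equal_generate_combinations_for_py := by
  intro email max_dots current_dots _ _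
  unfold Spec_generate_combinations_for_py
  unfold generate_combinations_for_py generate_combinations_for_py_alt
  rw [PySem.List.foldl_append_singleton_eq_map, List.nil_append]
  apply List.map_congr_left
  intro c hc
  have hsub := mem_pyCombinations_sublist _ _ c hc
  have hpw : c.Pairwise (· < ·) :=
    (PySem.List.pairwise_lt_pyRange_one 1 (max_dots + 1)).sublist hsub
  have hpos : ∀ p ∈ c, 1 ≤ p := by
    intro p hp
    have := hsub.mem hp
    exact ((PySem.List.mem_pyRange_one).mp this).1
  exact alias_eq email.toList c hpw hpos
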